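-- pv_equiv track=rewrite | github.com/azrielb1/Class-Projects | Math for CS/Assignments/tournaments.py | dominants
-- ===== SOURCE A (Python) =====
-- def length_2_paths(g):
--     x = set()
--     for i in g[1]:
--         for j in g[1]:
--             if j[0] == i[1]:
--                 x.add((i[0], j[1]))
--     return x
--
-- def dominants(g):
--     x = set()
--     for person in g[0]:
--         people_beat = [j[1] for j in g[1] if j[0] == person]
--         people_beat.extend([j[1] for j in length_2_paths(g) if j[0] == person])
--         if len(set(people_beat)) == len(g[0]) - 1:
--             x.add(person)
--     return x
-- ===== SOURCE B (Python) =====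
-- def dominants(g):
--     # Build adjacency once (source -> list of targets), then per vertex union
--     # direct targets with the targets of its targets; O(E^2+V*E) instead of O(V*E^2).
--     adj = {}
--     for (u, v) in g[1]:
--         adj.setdefault(u, []).append(v)
--     need = len(g[0]) - 1
--     x = set()
--     for person in g[0]:
--         direct = adj.get(person, [])
--         reach = set(direct)
--         for m in direct:
--             reach.update(adj.get(m, []))
--         if len(reach) == need:
--             x.add(person)
--     return x
-- ===== Notes on version B (the rewrite author's own statement) =====
-- stated objective: faster
-- what changed: B builds a source-indexed adjacency dict once and, per vertex, unions its neighbour lists with the neighbour lists of its targets, instead of recomputing the full length-2-path set (a quadratic double scan of the edge list) inside the loop over every vertex.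
import Mathlib
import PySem

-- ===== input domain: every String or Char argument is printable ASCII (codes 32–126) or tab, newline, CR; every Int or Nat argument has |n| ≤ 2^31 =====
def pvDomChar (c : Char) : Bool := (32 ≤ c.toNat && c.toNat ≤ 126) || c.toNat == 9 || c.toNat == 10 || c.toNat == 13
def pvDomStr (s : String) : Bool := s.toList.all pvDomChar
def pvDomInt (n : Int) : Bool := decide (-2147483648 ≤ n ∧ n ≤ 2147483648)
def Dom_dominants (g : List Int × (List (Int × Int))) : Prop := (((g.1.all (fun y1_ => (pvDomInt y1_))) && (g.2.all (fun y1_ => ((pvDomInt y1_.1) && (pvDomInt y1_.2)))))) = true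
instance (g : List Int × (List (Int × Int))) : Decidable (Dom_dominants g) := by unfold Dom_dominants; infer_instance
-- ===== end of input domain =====

-- B builds the adjacency index once and unions neighbour lists per vertex instead of
-- recomputing all length-2 paths for every vertex (objective: faster).

-- ===== PORT A =====
def length_2_paths (g : List Int × (List (Int × Int))) : PySem.Set (Int × Int) :=
  g.2.foldl (fun x i =>
    g.2.foldl (fun x j =>
      if j.1 == i.2 then PySem.Set.add x (i.1, j.2) else x) x)
    PySem.Set.empty

def dominants (g : List Int × (List (Int × Int))) : List Int :=
  g.1.foldl (fun x person =>
    let people_beat :=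
      ((g.2.filter (fun j => j.1 == person)).map (fun j => j.2)) ++
      (((length_2_paths g).filter (fun j => j.1 == person)).map (fun j => j.2))
    if ((PySem.Set.ofList people_beat).length : Int) == (g.1.length : Int) - 1 then
      PySem.Set.add x person
    else x)
    PySem.Set.empty

-- ===== PORT B =====
def dominants_alt (g : List Int × (List (Int × Int))) : List Int :=
  let adj : PySem.Dict Int (List Int) :=
    g.2.foldl (fun d e => d.modify e.1 [] (fun l => l ++ [e.2])) PySem.Dict.empty
  let need : Int := (g.1.length : Int) - 1
  g.1.foldl (fun x person =>
    let direct := adj.getD person []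
    let reach := direct.foldl (fun r m => PySem.Set.update r (adj.getD m []))
      (PySem.Set.ofList direct)
    if PySem.Set.len reach == need then PySem.Set.add x person else x)
    PySem.Set.empty

-- ===== PRECONDITION & SPEC =====
def Spec_dominants (g : List Int × (List (Int × Int))) (out : List Int) : Prop := out = dominants_alt g
instance (g : List Int × (List (Int × Int))) (out : List Int) : Decidable (Spec_dominants g out) := by unfold Spec_dominants; infer_instance

-- ===== CLAIM (what is proved, stated in full; the proofs are below) =====
def Claim_equal_dominants : Prop := ∀ (g : List Int × (List (Int × Int))), Dom_dominants g → Spec_dominants g (dominants g)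

-- ===== LEMMAS AND PROOFS =====

-- membership in A's inner "if … then add" fold
theorem pv_mem_foldl_add_if {α β : Type} [BEq β] [LawfulBEq β]
    (l : List α) (c : α → Bool) (f : α → β) (s : PySem.Set β) (y : β) :
    y ∈ l.foldl (fun x i => if c i then PySem.Set.add x (f i) else x) s ↔
      y ∈ s ∨ ∃ i ∈ l, c i = true ∧ f i = y := by
  induction l generalizing s with
  | nil => simp
  | cons a l ih =>
    simp only [List.foldl_cons, ih, List.mem_cons]
    by_cases h : c a = true
    · simp only [h, if_true, PySem.Set.mem_add]
      constructor
      · rintro ((hy | rfl) | ⟨i, hi, hc, hf⟩)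
        · exact Or.inl hy
        · exact Or.inr ⟨a, Or.inl rfl, h, rfl⟩
        · exact Or.inr ⟨i, Or.inr hi, hc, hf⟩
      · rintro (hy | ⟨i, (rfl | hi), hc, hf⟩)
        · exact Or.inl (Or.inl hy)
        · exact Or.inl (Or.inr hf.symm)
        · exact Or.inr ⟨i, hi, hc, hf⟩
    · simp only [h]
      constructor
      · rintro (hy | ⟨i, hi, hc, hf⟩)
        · exact Or.inl hy
        · exact Or.inr ⟨i, Or.inr hi, hc, hf⟩
      · rintro (hy | ⟨i, (rfl | hi), hc, hf⟩)
        · exact Or.inl hy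
        · exact absurd hc h
        · exact Or.inr ⟨i, hi, hc, hf⟩

-- membership in a double fold building the length-2-path set
theorem pv_mem_l2_aux (E out : List (Int × Int)) (s : PySem.Set (Int × Int)) (y : Int × Int) :
    y ∈ out.foldl (fun x i =>
        E.foldl (fun x j => if j.1 == i.2 then PySem.Set.add x (i.1, j.2) else x) x) s ↔
      y ∈ s ∨ ∃ i ∈ out, ∃ j ∈ E, j.1 = i.2 ∧ y = (i.1, j.2) := by
  induction out generalizing s with
  | nil => simp
  | cons a l ih =>
    simp only [List.foldl_cons, ih, List.mem_cons]
    rw [pv_mem_foldl_add_if E (fun j => j.1 == a.2) (fun j => (a.1, j.2)) s y]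
    constructor
    · rintro ((hy | ⟨j, hj, hc, hf⟩) | ⟨i, hi, j, hj, hc, hy⟩)
      · exact Or.inl hy
      · exact Or.inr ⟨a, Or.inl rfl, j, hj, by simpa using hc, hf.symm⟩
      · exact Or.inr ⟨i, Or.inr hi, j, hj, hc, hy⟩
    · rintro (hy | ⟨i, (rfl | hi), j, hj, hc, hy⟩)
      · exact Or.inl (Or.inl hy)
      · exact Or.inl (Or.inr ⟨j, hj, by simpa using hc, hy.symm⟩)
      · exact Or.inr ⟨i, hi, j, hj, hc, hy⟩

theorem pv_mem_l2 (g : List Int × (List (Int × Int))) (y : Int × Int) :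
    y ∈ length_2_paths g ↔ ∃ i ∈ g.2, ∃ j ∈ g.2, j.1 = i.2 ∧ y = (i.1, j.2) := by
  unfold length_2_paths
  rw [pv_mem_l2_aux]
  simp [PySem.Set.empty]

-- the adjacency dict groups edge targets by source
theorem pv_adj_getD (E : List (Int × Int)) (d : PySem.Dict Int (List Int)) (u : Int) :
    (E.foldl (fun d e => d.modify e.1 [] (fun l => l ++ [e.2])) d).getD u [] =
      d.getD u [] ++ (E.filter (fun e => e.1 == u)).map (fun e => e.2) := by
  induction E generalizing d with
  | nil => simp
  | cons a l ih =>
    simp only [List.foldl_cons, ih, List.filter_cons]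
    rw [PySem.Dict.getD_modify]
    by_cases h : a.1 = u
    · simp [h]
    · simp [h, Ne.symm h]

theorem pv_adj_getD' (g : List Int × (List (Int × Int))) (u : Int) :
    (g.2.foldl (fun d e => d.modify e.1 [] (fun l => l ++ [e.2]))
        (PySem.Dict.empty : PySem.Dict Int (List Int))).getD u [] =
      (g.2.filter (fun e => e.1 == u)).map (fun e => e.2) := by
  rw [pv_adj_getD]; simp [pysem]

-- membership in B's union fold
theorem pv_mem_foldl_update {α : Type} [BEq α] [LawfulBEq α]
    (l : List α) (f : α → List α) (s : PySem.Set α) (y : α) :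
    y ∈ l.foldl (fun r m => PySem.Set.update r (f m)) s ↔ y ∈ s ∨ ∃ m ∈ l, y ∈ f m := by
  induction l generalizing s with
  | nil => simp
  | cons a l ih =>
    simp only [List.foldl_cons, ih, PySem.Set.mem_update, List.mem_cons]
    constructor
    · rintro ((hy | hy) | ⟨m, hm, hf⟩)
      · exact Or.inl hy
      · exact Or.inr ⟨a, Or.inl rfl, hy⟩
      · exact Or.inr ⟨m, Or.inr hm, hf⟩
    · rintro (hy | ⟨m, (rfl | hm), hf⟩)
      · exact Or.inl (Or.inl hy)
      · exact Or.inl (Or.inr hf)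
      · exact Or.inr ⟨m, hm, hf⟩

theorem pv_nodup_foldl_update {α : Type} [BEq α] [LawfulBEq α]
    (l : List α) (f : α → List α) (s : PySem.Set α) (hs : List.Nodup s) :
    List.Nodup (l.foldl (fun r m => PySem.Set.update r (f m)) s) := by
  induction l generalizing s with
  | nil => exact hs
  | cons a l ih => exact ih _ (PySem.Set.nodup_update _ _ hs)

-- per-vertex: A's candidate set and B's reach set have the same elements, hence the same size
theorem pv_len_eq (g : List Int × (List (Int × Int))) (person : Int) :
    (PySem.Set.ofList
        (((g.2.filter (fun j => j.1 == person)).map (fun j => j.2)) ++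
          (((length_2_paths g).filter (fun j => j.1 == person)).map (fun j => j.2)))).length =
      (((g.2.foldl (fun d e => d.modify e.1 [] (fun l => l ++ [e.2]))
            (PySem.Dict.empty : PySem.Dict Int (List Int))).getD person []).foldl
          (fun r m => PySem.Set.update r
            ((g.2.foldl (fun d e => d.modify e.1 [] (fun l => l ++ [e.2]))
                (PySem.Dict.empty : PySem.Dict Int (List Int))).getD m []))
          (PySem.Set.ofList
            ((g.2.foldl (fun d e => d.modify e.1 [] (fun l => l ++ [e.2]))
                (PySem.Dict.empty : PySem.Dict Int (List Int))).getD person []))).length := by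
  apply List.Perm.length_eq
  rw [List.perm_ext_iff_of_nodup (PySem.Set.nodup_ofList _)
      (pv_nodup_foldl_update _ _ _ (PySem.Set.nodup_ofList _))]
  intro x
  rw [PySem.Set.mem_ofList, pv_mem_foldl_update, PySem.Set.mem_ofList]
  simp only [List.mem_append, List.mem_map, List.mem_filter, pv_adj_getD', pv_mem_l2]
  constructor
  · rintro (h | ⟨p, ⟨⟨i, hi, j, hj, hji, rfl⟩, hc⟩, rfl⟩)
    · exact Or.inl h
    · have hip : i.1 = person := by simpa using hc
      exact Or.inr ⟨i.2, ⟨i, ⟨hi, by simp [hip]⟩, rfl⟩, ⟨j, ⟨hj, by simp [hji]⟩, rfl⟩⟩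
  · rintro (h | ⟨m, ⟨i, ⟨hi, hci⟩, rfl⟩, ⟨j, ⟨hj, hcj⟩, rfl⟩⟩)
    · exact Or.inl h
    · have hip : i.1 = person := by simpa using hci
      exact Or.inr ⟨(i.1, j.2), ⟨⟨i, hi, j, hj, by simpa using hcj, rfl⟩, by simp [hip]⟩, rfl⟩

-- ===== VERDICT (by name: the statement is the Claim_ definition above) =====
theorem dominants_spec : Claim_equal_dominants := by
  intro g _
  show dominants g = dominants_alt g
  unfold dominants dominants_alt
  apply PySem.List.foldl_congr_mem
  intro acc person _
  simp only
  rw [pv_len_eq g person]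
  simp only [PySem.Set.len]
  rfl
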